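-- pv_equiv track=rewrite | github.com/Python-study-f/Algorithm-study_1H | Programmers/2Level/SummerWinterCoding/an_intact_square_62048/choboman.py | solution
-- ===== SOURCE A (Python) =====
-- def solution(w, h):
--     total_paper = w * h
--     temp_paper = w + h
--     answer = 0
--
--     if w > h:
--         pass
--     else:
--         w, h = h, w
--
--     # w가 최대공약수로 변환되어 나옴
--     # 유클리드 호제법
--     while h > 0:
--         w, h = h, w % h
--
--     answer = total_paper - temp_paper + w
--
--     return answer
-- ===== SOURCE B (Python) =====
-- def _gcd(a, b):
--     # textbook recursive Euclid; stops when the second argument is not positive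
--     return a if b <= 0 else _gcd(b, a % b)
--
--
-- def solution(w, h):
--     return w * h - (w + h) + _gcd(max(w, h), min(w, h))
-- ===== Notes on version B (the rewrite author's own statement) =====
-- stated objective: simpler
-- what changed: Replaces A's accumulator variables, explicit swap branch and inline while-loop Euclid with a one-line formula calling a recursive gcd helper on (max(w,h), min(w,h)).
import Mathlib
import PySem

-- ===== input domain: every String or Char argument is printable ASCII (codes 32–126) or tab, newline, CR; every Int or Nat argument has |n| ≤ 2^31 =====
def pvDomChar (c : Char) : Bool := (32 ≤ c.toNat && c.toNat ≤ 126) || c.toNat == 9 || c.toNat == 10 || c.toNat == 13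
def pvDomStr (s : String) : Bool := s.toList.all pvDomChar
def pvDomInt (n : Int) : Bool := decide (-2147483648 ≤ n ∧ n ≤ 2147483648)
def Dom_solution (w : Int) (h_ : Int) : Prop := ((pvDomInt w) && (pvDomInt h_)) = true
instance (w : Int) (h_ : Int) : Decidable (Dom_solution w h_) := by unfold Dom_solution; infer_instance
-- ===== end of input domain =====

-- B replaces A's swap branch, accumulator variables and inline while-loop Euclid
-- with a one-line formula using a recursive gcd helper (objective: simpler).


-- ===== PORT A =====
-- A's `while h > 0: w, h = h, w % h` loop, step for step (% = PySem.Int.mod)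
def solutionWhile (w h : Int) : Int :=
  if hpos : 0 < h then solutionWhile h (PySem.Int.mod w h) else w
termination_by h.toNat
decreasing_by
  have := PySem.Int.mod_nonneg w hpos
  have := PySem.Int.mod_lt w hpos
  omega

def solution (w : Int) (h_ : Int) : Int :=
  let total_paper := w * h_
  let temp_paper := w + h_
  -- if w > h: pass  else: w, h = h, w
  let p := if w > h_ then (w, h_) else (h_, w)
  total_paper - temp_paper + solutionWhile p.1 p.2

-- ===== PORT B =====
-- recursive helper: _gcd(a, b) = a if b <= 0 else _gcd(b, a % b)
def gcdRec (a b : Int) : Int :=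
  if hb : b ≤ 0 then a else gcdRec b (PySem.Int.mod a b)
termination_by b.toNat
decreasing_by
  have hpos : 0 < b := by omega
  have := PySem.Int.mod_nonneg a hpos
  have := PySem.Int.mod_lt a hpos
  omega

def solution_alt (w : Int) (h_ : Int) : Int :=
  w * h_ - (w + h_) + gcdRec (max w h_) (min w h_)

-- ===== PRECONDITION & SPEC =====
def Spec_solution (w : Int) (h_ : Int) (out : Int) : Prop := out = solution_alt w h_
instance (w : Int) (h_ : Int) (out : Int) : Decidable (Spec_solution w h_ out) := by unfold Spec_solution; infer_instance

-- ===== CLAIM (what is proved, stated in full; the proofs are below) =====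
def Claim_equal_solution : Prop := ∀ (w : Int) (h_ : Int), Dom_solution w h_ → Spec_solution w h_ (solution w h_)

-- ===== LEMMAS AND PROOFS =====
theorem solutionWhile_eq_gcdRec (w h : Int) : solutionWhile w h = gcdRec w h := by
  induction w, h using solutionWhile.induct with
  | _ w h =>
    rw [solutionWhile, gcdRec]
    split <;> split <;> first | rfl | omega

-- ===== VERDICT (by name: the statement is the Claim_ definition above) =====
theorem solution_spec : Claim_equal_solution := by
  intro w h_ _
  unfold Spec_solution solution solution_alt
  by_cases hle : w ≤ h_
  · have : ¬ (w > h_) := by omega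
    simp only [this, if_false, solutionWhile_eq_gcdRec]
    have h1 : max w h_ = h_ := max_eq_right hle
    have h2 : min w h_ = w := min_eq_left hle
    rw [h1, h2]
  · have : w > h_ := by omega
    simp only [this, if_true, solutionWhile_eq_gcdRec]
    have h1 : max w h_ = w := max_eq_left (by omega)
    have h2 : min w h_ = h_ := min_eq_right (by omega)
    rw [h1, h2]
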